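-- pv_equiv track=rewrite | github.com/jesnie/jopfra | jopfra/problems/utils.py | pretty_exp
-- ===== SOURCE A (Python) =====
-- from collections.abc import Iterator
--
-- def pretty_exp(n: int | None = None) -> Iterator[int]:
--     m = 0
--     base = 1
--     scales = (1, 2, 5)
--     while True:
--         for s in scales:
--             if n is not None and m >= n:
--                 return
--             yield s * base
--             m += 1
--         base *= 10
-- ===== SOURCE B (Python) =====
-- def pretty_exp(n=None):
--     # Recurrence on the value itself: no counters, no powers-of-ten accumulator,
--     # no (1,2,5) tuple.  The next term is 2*x, except when x = 2*10**q, where it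
--     # is x*5//2 = 5*10**q.  Since 10 == 1 (mod 9), x % 9 recovers the mantissa,
--     # so the exceptional case is exactly x % 9 == 2.
--     x = 1
--     while n is None or n > 0:
--         yield x
--         x = x * 5 // 2 if x % 9 == 2 else 2 * x
--         if n is not None:
--             n -= 1
-- ===== Notes on version B (the rewrite author's own statement) =====
-- stated objective: alternative
-- what changed: Replaces A's nested while/for loops over the (1,2,5) tuple with the base and m accumulators by a first-order recurrence on the value itself: the only state is the previous term x, and the next term is 2*x unless x's mantissa is 2 (detected arithmetically via x % 9 == 2, since 10 = 1 mod 9), in which case it is x*5//2; Pre_ excludes n=None, on which both generators are infinite and A never finishes yielding.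
import Mathlib
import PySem

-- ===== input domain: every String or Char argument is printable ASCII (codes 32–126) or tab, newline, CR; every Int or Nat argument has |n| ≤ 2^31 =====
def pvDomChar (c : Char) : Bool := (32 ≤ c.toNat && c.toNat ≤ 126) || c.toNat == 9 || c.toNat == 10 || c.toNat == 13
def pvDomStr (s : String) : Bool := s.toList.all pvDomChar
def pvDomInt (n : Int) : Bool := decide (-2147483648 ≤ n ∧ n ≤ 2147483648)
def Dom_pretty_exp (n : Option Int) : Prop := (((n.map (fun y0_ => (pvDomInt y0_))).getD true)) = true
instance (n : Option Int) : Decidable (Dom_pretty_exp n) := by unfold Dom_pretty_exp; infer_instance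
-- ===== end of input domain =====

-- B replaces A's nested loops (base/m accumulators, the (1,2,5) tuple) by a first-order
-- recurrence on the value itself: next = 2*x, except x*5//2 when x % 9 == 2 (mantissa 2,
-- since 10 = 1 mod 9).  Objective: alternative.  Both Pythons are generators; the proved
-- equality is about the finite list of yielded values.

-- ===== PORT A =====
-- A's while True / for s in (1,2,5) loop, with the early 'return' checks kept in order;
-- the inner for-loop over the 3-tuple is unrolled. With n = some k the generator yields
-- finitely many values; termination measure is the remaining count (k - m).
def prettyExpGoA (k m base : Int) : List Int :=
  if m ≥ k then [] else
  1 * base ::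
  if m + 1 ≥ k then [] else
  2 * base ::
  if m + 2 ≥ k then [] else
  5 * base :: prettyExpGoA k (m + 3) (base * 10)
termination_by (k - m).toNat
decreasing_by omega

-- n = none makes A's iterator infinite (excluded by Pre_); the port returns [] there.
def pretty_exp (n : Option Int) : List Int :=
  match n with
  | none => []
  | some k => prettyExpGoA k 0 1

-- ===== PORT B =====
-- B's single while-loop body: yield x; x = x*5//2 if x % 9 == 2 else 2*x; n -= 1.
-- State is (remaining count, previous value); termination measure is the remaining count.
def prettyExpGoB (k x : Int) : List Int :=
  if k > 0 then
    x :: prettyExpGoB (k - 1)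
      (if PySem.Int.mod x 9 = 2 then PySem.Int.floordiv (x * 5) 2 else 2 * x)
  else []
termination_by k.toNat
decreasing_by omega

-- n = none makes B's iterator infinite (excluded by Pre_); the port returns [] there.
def pretty_exp_alt (n : Option Int) : List Int :=
  match n with
  | none => []
  | some k => prettyExpGoB k 1

-- ===== PRECONDITION & SPEC =====
-- Pre_ excludes n = None, on which both generators are infinite: A never returns a finite
-- list of values there, so no finite-value claim can cover it.
def Pre_pretty_exp (n : Option Int) : Prop := n.isSome = true
instance (n : Option Int) : Decidable (Pre_pretty_exp n) := by unfold Pre_pretty_exp; infer_instance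

def pvWitness_pretty_exp : Option Int := (some 7)

def Spec_pretty_exp (n : Option Int) (out : List Int) : Prop := out = pretty_exp_alt n
instance (n : Option Int) (out : List Int) : Decidable (Spec_pretty_exp n out) := by unfold Spec_pretty_exp; infer_instance

-- ===== CLAIM (what is proved, stated in full; the proofs are below) =====
def Claim_equal_pretty_exp : Prop := ∀ (n : Option Int), Dom_pretty_exp n → Pre_pretty_exp n → Spec_pretty_exp n (pretty_exp n)

-- ===== LEMMAS AND PROOFS =====

-- 10^j ≡ 1 (mod 9), so s * 10^j ≡ s (mod 9) for the mantissas s = 1, 2, 5.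
lemma pow10_emod9 (j : Nat) : (10 : Int) ^ j % 9 = 1 := by
  induction j with
  | zero => rfl
  | succ j ih => rw [pow_succ, Int.mul_emod, ih]; rfl

lemma mod9_pow10 (j : Nat) : PySem.Int.mod ((10 : Int) ^ j) 9 = 1 := by
  rw [PySem.Int.mod_eq_emod_of_pos (by norm_num), pow10_emod9]

lemma mod9_mul_pow10 (s : Int) (j : Nat) (h0 : 0 ≤ s) (h9 : s < 9) :
    PySem.Int.mod (s * 10 ^ j) 9 = s := by
  rw [PySem.Int.mod_eq_emod_of_pos (by norm_num), Int.mul_emod, pow10_emod9]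
  simp [Int.emod_emod_of_dvd]
  omega

-- the exceptional step: (2*10^j)*5 // 2 = 5*10^j (exact division)
lemma step_two (j : Nat) : PySem.Int.floordiv (2 * 10 ^ j * 5) 2 = 5 * 10 ^ j := by
  rw [PySem.Int.floordiv_eq_ediv_of_pos (by norm_num),
    show (2 : Int) * 10 ^ j * 5 = 2 * (5 * 10 ^ j) by ring,
    Int.mul_ediv_cancel_left _ (by norm_num)]

-- Loop correspondence: at A's outer-loop entry m = 3*j, base = 10^j; B's state is the
-- remaining count k - 3*j and the value x = 10^j.  One A step = three B steps.
lemma goA_eq_goB (F : Nat) : ∀ (j : Nat) (k : Int),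
    (k - 3 * (j : Int)).toNat ≤ F →
    prettyExpGoA k (3 * (j : Int)) ((10 : Int) ^ j) =
      prettyExpGoB (k - 3 * (j : Int)) ((10 : Int) ^ j) := by
  induction F with
  | zero =>
    intro j k h
    rw [prettyExpGoA, prettyExpGoB,
      if_pos (show 3 * (j : Int) ≥ k by omega), if_neg (show ¬ k - 3 * (j : Int) > 0 by omega)]
  | succ F ih =>
    intro j k h
    by_cases hk : 3 * (j : Int) ≥ k
    · rw [prettyExpGoA, prettyExpGoB, if_pos hk, if_neg (show ¬ k - 3 * (j : Int) > 0 by omega)]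
    · rw [prettyExpGoA, if_neg (by omega)]
      rw [prettyExpGoB, if_pos (show k - 3 * (j : Int) > 0 by omega),
        mod9_pow10 j, if_neg (show ¬ (1 : Int) = 2 by norm_num)]
      by_cases hk1 : 3 * (j : Int) + 1 ≥ k
      · rw [if_pos hk1, prettyExpGoB, if_neg (show ¬ k - 3 * (j : Int) - 1 > 0 by omega)]
        ring_nf
      · rw [if_neg hk1, prettyExpGoB, if_pos (show k - 3 * (j : Int) - 1 > 0 by omega),
          mod9_mul_pow10 2 j (by norm_num) (by norm_num),
          if_pos (show (2 : Int) = 2 from rfl), step_two]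
        by_cases hk2 : 3 * (j : Int) + 2 ≥ k
        · rw [if_pos hk2, prettyExpGoB, if_neg (show ¬ k - 3 * (j : Int) - 1 - 1 > 0 by omega)]
          ring_nf
        · rw [if_neg hk2, prettyExpGoB, if_pos (show k - 3 * (j : Int) - 1 - 1 > 0 by omega),
            mod9_mul_pow10 5 j (by norm_num) (by norm_num),
            if_neg (show ¬ (5 : Int) = 2 by norm_num)]
          have hrec := ih (j + 1) k (by push_cast; omega)
          have e1 : (3 : Int) * ((j : Nat) + 1 : Nat) = 3 * (j : Int) + 3 := by push_cast; ring
          have e2 : ((10 : Int) ^ (j + 1)) = 10 ^ j * 10 := by ring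
          rw [e1, e2] at hrec
          rw [show k - 3 * (j : Int) - 1 - 1 - 1 = k - (3 * (j : Int) + 3) by ring,
            show (2 : Int) * (5 * 10 ^ j) = 10 ^ j * 10 by ring, hrec]
          ring_nf

-- ===== VERDICT (by name: the statement is the Claim_ definition above) =====
theorem pretty_exp_spec : Claim_equal_pretty_exp := by
  intro n _ hpre
  unfold Spec_pretty_exp
  match n with
  | none => simp [Pre_pretty_exp] at hpre
  | some k =>
    show prettyExpGoA k 0 1 = prettyExpGoB k 1
    have := goA_eq_goB (k - 0).toNat 0 k (by omega)
    simpa using this
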